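-- pv_equiv track=rewrite | github.com/PrinceSinghhub/InterviewBit-Question-Pratice | InterviewBit Question Pratice/Max Product Count.py | maxProductCount
-- ===== SOURCE A (Python) =====
-- def maxProductCount(arr, n):
--     # To store the product of two number as Key and value as the total number of occurrence.
--     mapp = {}
--
--     # To find all pair product and store it to dictionary with there frequencies.
--     for i in range(n):
--         for j in range(i + 1, n):
--             a = arr[i]
--             b = arr[j]
--             pairproduct = a * b
--             if pairproduct in mapp:
--                 mapp[pairproduct] += 1
--             else:
--                 mapp[pairproduct] = 1
--
--     # To store max product pair.
--     maxProd = 0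
--
--     # To store frequency of max product.
--     freq = 0
--
--     # Traverse the Dictionary.
--     for prod in mapp.keys():
--         if mapp.get(prod) >= freq:
--             # If frequency is same as previous max frequency then choose the one with minimum product.
--             if mapp.get(prod) == freq:
--                 maxProd = min(maxProd, prod)
--             else:
--                 maxProd = prod
--
--             freq = mapp.get(prod)
--
--     # List to store the values of max product and Quadruples.
--     lst = []
--
--     # If there is no pair having frequency count > 1.
--     if (mapp.get(maxProd) == None or mapp.get(maxProd) == 1):
--         # Returning the array containing max product and number of Quadruples.
--         lst.append(0)
--         lst.append(0)
--         return lst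
--     else:
--         # Calculating total Quadruples as all Combination a pair can have with given frequency.
--         allCombinations = ((freq * (freq - 1))) // 2
--         # Returning the pair of max product and number of Quadruples.
--         lst.append(maxProd)
--         lst.append(allCombinations)
--         return lst
-- ===== SOURCE B (Python) =====
-- def maxProductCount(arr, n):
--     products = [arr[i] * arr[j] for i in range(n) for j in range(i + 1, n)]
--     if not products:
--         return [0, 0]
--     freq = max(products.count(p) for p in products)
--     if freq == 1:
--         return [0, 0]
--     best = min(p for p in products if products.count(p) == freq)
--     return [best, freq * (freq - 1) // 2]
-- ===== Notes on version B (the rewrite author's own statement) =====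
-- stated objective: simpler
-- what changed: Replaces A's hash-map frequency table plus running (maxProd, freq) accumulator scan over the keys with a flat list of all pairwise products queried directly by count/max/min (min over the argmax filter reproduces A's smallest-product tie-break).
import Mathlib
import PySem

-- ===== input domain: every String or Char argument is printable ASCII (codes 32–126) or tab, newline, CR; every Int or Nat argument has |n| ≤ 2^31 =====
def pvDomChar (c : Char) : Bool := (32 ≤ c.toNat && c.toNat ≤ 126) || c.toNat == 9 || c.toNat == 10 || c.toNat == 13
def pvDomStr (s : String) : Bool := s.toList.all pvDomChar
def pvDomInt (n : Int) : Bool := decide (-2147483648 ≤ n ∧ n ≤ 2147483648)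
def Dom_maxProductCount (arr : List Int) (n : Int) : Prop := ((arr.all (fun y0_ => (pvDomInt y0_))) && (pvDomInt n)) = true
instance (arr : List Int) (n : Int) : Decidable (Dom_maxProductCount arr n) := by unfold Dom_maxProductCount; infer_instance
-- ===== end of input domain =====

-- B replaces A's hash-map frequency table and running (maxProd, freq) accumulator scan with a flat
-- pairwise-product list queried by count/max/min (objective: simpler; not faster).

-- ===== PORT A =====
def maxProductCount (arr : List Int) (n : Int) : List Int :=
  let mapp : PySem.Dict Int Int :=
    (PySem.List.pyRange 0 n 1).foldl (fun mapp i =>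
      (PySem.List.pyRange (i + 1) n 1).foldl (fun mapp j =>
        let a := PySem.List.pyGetD arr i 0     -- arr[i]; index in range under Pre_
        let b := PySem.List.pyGetD arr j 0     -- arr[j]; index in range under Pre_
        let pairproduct := a * b
        if mapp.contains pairproduct then
          mapp.insert pairproduct (mapp.getD pairproduct 0 + 1)
        else
          mapp.insert pairproduct 1) mapp) PySem.Dict.empty
  let st :=
    mapp.keys.foldl (fun (s : Int × Int) prod =>
      let c := mapp.getD prod 0    -- mapp.get(prod): prod is a key of mapp, so get? = some
      if c ≥ s.2 then
        ((if c = s.2 then min s.1 prod else prod), c)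
      else s) (0, 0)
  let maxProd := st.1
  let freq := st.2
  match mapp.get? maxProd with
  | none => [0, 0]
  | some v =>
      if v = 1 then [0, 0]
      else [maxProd, PySem.Int.floordiv (freq * (freq - 1)) 2]

-- ===== PORT B =====
def maxProductCount_alt (arr : List Int) (n : Int) : List Int :=
  let products :=
    (PySem.List.pyRange 0 n 1).flatMap (fun i =>
      (PySem.List.pyRange (i + 1) n 1).map (fun j =>
        PySem.List.pyGetD arr i 0 * PySem.List.pyGetD arr j 0))   -- arr[i]*arr[j]; in range under Pre_
  match products with
  | [] => [0, 0]
  | _ :: _ =>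
    -- products is nonempty here, so Python's max(...) returns: max? = some and .getD 0 is exact
    let freq := (PySem.List.max? (products.map (fun p => (PySem.List.count products p : Int)))
                  (fun x => x)).getD 0
    if freq = 1 then [0, 0]
    else
      let best := (PySem.List.min? (products.filter (fun p => (PySem.List.count products p : Int) == freq))
                    (fun x => x)).getD 0
      [best, PySem.Int.floordiv (freq * (freq - 1)) 2]

-- ===== PRECONDITION & SPEC =====
-- Pre_ excludes exactly the inputs where Python A raises IndexError: n larger than len(arr)
-- (both A and B index arr[i] for every i in range(n)).
def Pre_maxProductCount (arr : List Int) (n : Int) : Prop := n ≤ (arr.length : Int)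
instance (arr : List Int) (n : Int) : Decidable (Pre_maxProductCount arr n) := by unfold Pre_maxProductCount; infer_instance
def pvWitness_maxProductCount : List Int × Int := ([1, 2, 3, 2], 4)

def Spec_maxProductCount (arr : List Int) (n : Int) (out : List Int) : Prop := out = maxProductCount_alt arr n
instance (arr : List Int) (n : Int) (out : List Int) : Decidable (Spec_maxProductCount arr n out) := by unfold Spec_maxProductCount; infer_instance

-- ===== CLAIM (what is proved, stated in full; the proofs are below) =====
def Claim_equal_maxProductCount : Prop := ∀ (arr : List Int) (n : Int), Dom_maxProductCount arr n → Pre_maxProductCount arr n → Spec_maxProductCount arr n (maxProductCount arr n)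

-- ===== LEMMAS AND PROOFS =====

-- count of k in P, as the Int that A's dict stores and B compares with
def pvC (P : List Int) (k : Int) : Int := (PySem.List.count P k : Int)

-- the body of A's key-scan loop, with the dict lookup already rewritten to the count
def pvStep (P : List Int) (s : Int × Int) (k : Int) : Int × Int :=
  if pvC P k ≥ s.2 then ((if pvC P k = s.2 then min s.1 k else k), pvC P k) else s

lemma pvC_pos (P : List Int) (k : Int) (h : k ∈ P) : 1 ≤ pvC P k := by
  unfold pvC
  rw [PySem.List.count_eq]
  exact_mod_cast List.count_pos_iff.mpr h

-- A's key scan returns (min product among max-count keys, max count)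
lemma pvScan_spec (P : List Int) (l : List Int) (hpos : ∀ k ∈ l, 1 ≤ pvC P k) (hne : l ≠ []) :
    (l.foldl (pvStep P) (0, 0)).1 ∈ l ∧
    pvC P (l.foldl (pvStep P) (0, 0)).1 = (l.foldl (pvStep P) (0, 0)).2 ∧
    (∀ k ∈ l, pvC P k ≤ (l.foldl (pvStep P) (0, 0)).2) ∧
    (∀ k ∈ l, pvC P k = (l.foldl (pvStep P) (0, 0)).2 → (l.foldl (pvStep P) (0, 0)).1 ≤ k) := by
  induction l using List.reverseRecOn with
  | nil => exact absurd rfl hne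
  | append_singleton l k ih =>
    rw [List.foldl_append, List.foldl_cons, List.foldl_nil]
    by_cases hl : l = []
    · subst hl
      have hk : 1 ≤ pvC P k := hpos k (by simp)
      simp only [List.foldl_nil, pvStep]
      rw [if_pos (by omega), if_neg (by omega)]
      refine ⟨by simp, rfl, ?_, ?_⟩
      · intro k' hk'; simp at hk'; subst hk'; exact le_refl _
      · intro k' hk' _; simp at hk'; subst hk'; exact le_refl _
    · obtain ⟨h1, h2, h3, h4⟩ := ih (fun x hx => hpos x (by simp [hx])) hl
      set r := l.foldl (pvStep P) (0, 0) with hr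
      unfold pvStep
      by_cases hge : pvC P k ≥ r.2
      · by_cases heq : pvC P k = r.2
        · rw [if_pos hge, if_pos heq]
          refine ⟨?_, ?_, ?_, ?_⟩
          · rcases min_choice r.1 k with h | h <;> rw [h] <;> simp [h1]
          · rcases min_choice r.1 k with h | h
            · rw [h, h2, heq]
            · rw [h]
          · intro k' hk'
            rcases List.mem_append.mp hk' with h | h
            · exact le_trans (h3 k' h) (le_of_eq heq.symm)
            · simp at h; subst h; exact le_refl _
          · intro k' hk' hck'
            rcases List.mem_append.mp hk' with h | h
            · exact le_trans (min_le_left _ _) (h4 k' h (by omega))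
            · simp at h; subst h; exact min_le_right _ _
        · rw [if_pos hge, if_neg heq]
          have hlt : r.2 < pvC P k := lt_of_le_of_ne hge (fun h => heq h.symm)
          refine ⟨by simp, rfl, ?_, ?_⟩
          · intro k' hk'
            rcases List.mem_append.mp hk' with h | h
            · exact le_of_lt (lt_of_le_of_lt (h3 k' h) hlt)
            · simp at h; subst h; exact le_refl _
          · intro k' hk' hck'
            rcases List.mem_append.mp hk' with h | h
            · exact absurd hck' (by have := h3 k' h; omega)
            · simp at h; subst h; exact le_refl _
      · rw [if_neg hge]
        refine ⟨by simp [h1], h2, ?_, ?_⟩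
        · intro k' hk'
          rcases List.mem_append.mp hk' with h | h
          · exact h3 k' h
          · simp at h; subst h; omega
        · intro k' hk' hck'
          rcases List.mem_append.mp hk' with h | h
          · exact h4 k' h hck'
          · simp at h; subst h; omega

-- the common core: A's dict-and-scan pipeline equals B's count/max/min pipeline, for any product list P
lemma pvMain (P : List Int) :
    (let st := (PySem.Set.ofList P).foldl (pvStep P) (0, 0);
     match (PySem.Dict.counter P).get? st.1 with
     | none => ([0, 0] : List Int)
     | some v => if v = 1 then [0, 0] else [st.1, PySem.Int.floordiv (st.2 * (st.2 - 1)) 2])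
    = match P with
      | [] => [0, 0]
      | _ :: _ =>
        let freq := (PySem.List.max? (P.map (fun p => (PySem.List.count P p : Int))) (fun x => x)).getD 0
        if freq = 1 then [0, 0]
        else
          [(PySem.List.min? (P.filter (fun p => (PySem.List.count P p : Int) == freq)) (fun x => x)).getD 0,
           PySem.Int.floordiv (freq * (freq - 1)) 2] := by
  cases P with
  | nil => decide
  | cons a t =>
    have hne : PySem.Set.ofList (a :: t) ≠ [] := by
      intro h
      have ha := (PySem.Set.mem_ofList (a :: t) a).mpr (by simp)
      rw [h] at ha
      simp at ha
    have hpos : ∀ k ∈ PySem.Set.ofList (a :: t), 1 ≤ pvC (a :: t) k := fun k hk =>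
      pvC_pos _ _ ((PySem.Set.mem_ofList _ _).mp hk)
    obtain ⟨h1, h2, h3, h4⟩ := pvScan_spec (a :: t) _ hpos hne
    set st := (PySem.Set.ofList (a :: t)).foldl (pvStep (a :: t)) (0, 0) with hst
    have hmem : st.1 ∈ (a :: t) := (PySem.Set.mem_ofList _ _).mp h1
    -- A's final lookup: the key is present and holds its count
    have hisSome : ((PySem.Dict.counter (a :: t)).get? st.1).isSome := by
      rw [← PySem.Dict.contains_eq_isSome_get?, PySem.Dict.contains_counter]
      simpa using hmem
    obtain ⟨v, hv⟩ := Option.isSome_iff_exists.mp hisSome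
    have hvval : v = pvC (a :: t) st.1 := by
      have hgd := PySem.Dict.getD_eq_get?_getD (PySem.Dict.counter (a :: t)) st.1 0
      rw [hv, PySem.Dict.getD_counter] at hgd
      simp at hgd
      simp [pvC, PySem.List.count_eq, ← hgd]
    -- B's max
    obtain ⟨F, hF⟩ : ∃ F, PySem.List.max? ((a :: t).map (fun p => (PySem.List.count (a :: t) p : Int))) (fun x => x) = some F := by
      cases hmax : PySem.List.max? ((a :: t).map (fun p => (PySem.List.count (a :: t) p : Int))) (fun x => x) with
      | none => exact absurd ((PySem.List.max?_eq_none_iff _ _).mp hmax) (by simp)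
      | some F => exact ⟨F, rfl⟩
    have hFmem := PySem.List.max?_mem hF
    have hFmax := PySem.List.max?_isMax hF
    have hF2 : F = st.2 := by
      apply le_antisymm
      · obtain ⟨p, hp, hpc⟩ := List.mem_map.mp hFmem
        have := h3 p ((PySem.Set.mem_ofList _ _).mpr hp)
        rw [← hpc]
        simpa [pvC] using this
      · have := hFmax (pvC (a :: t) st.1) (List.mem_map.mpr ⟨st.1, hmem, rfl⟩)
        simpa [h2] using this
    have hvF : v = F := by rw [hvval, h2, hF2]
    show (match (PySem.Dict.counter (a :: t)).get? st.1 with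
     | none => ([0, 0] : List Int)
     | some v => if v = 1 then [0, 0] else [st.1, PySem.Int.floordiv (st.2 * (st.2 - 1)) 2]) = _
    rw [hv, hF]
    simp only [Option.getD_some]
    by_cases hF1 : F = 1
    · rw [if_pos (hvF.trans hF1), if_pos hF1]
    · rw [if_neg (fun h => hF1 (hvF.symm.trans h)), if_neg hF1]
      -- B's min over the argmax filter equals A's running minimum
      have hfl : st.1 ∈ (a :: t).filter (fun p => (PySem.List.count (a :: t) p : Int) == F) := by
        apply List.mem_filter.mpr
        refine ⟨hmem, ?_⟩
        have : pvC (a :: t) st.1 = F := by rw [h2, hF2]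
        simpa [pvC] using this
      obtain ⟨m, hm⟩ : ∃ m, PySem.List.min? ((a :: t).filter (fun p => (PySem.List.count (a :: t) p : Int) == F)) (fun x => x) = some m := by
        cases hmin : PySem.List.min? ((a :: t).filter (fun p => (PySem.List.count (a :: t) p : Int) == F)) (fun x => x) with
        | none =>
          have := (PySem.List.min?_eq_none_iff _ _).mp hmin
          rw [this] at hfl
          simp at hfl
        | some m => exact ⟨m, rfl⟩
      have hmmem := PySem.List.min?_mem hm
      have hmmin := PySem.List.min?_isMin hm
      obtain ⟨hmP, hmc⟩ := List.mem_filter.mp hmmem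
      have hmcF : pvC (a :: t) m = st.2 := by
        rw [← hF2]
        simpa [pvC] using hmc
      have hstm : st.1 = m :=
        le_antisymm (h4 m ((PySem.Set.mem_ofList _ _).mpr hmP) hmcF) (hmmin st.1 hfl)
      rw [hm]
      simp only [Option.getD_some]
      rw [hstm, hF2]

-- nested index loops producing dict updates = one fold over the flat product list
lemma pvFoldlNested {α β γ : Type} (l : List α) (f : α → List β) (k : α → β → Int) (g : γ → Int → γ) (init : γ) :
    l.foldl (fun acc x => (f x).foldl (fun d j => g d (k x j)) acc) init
      = (l.flatMap (fun x => (f x).map (k x))).foldl g init := by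
  rw [List.foldl_flatMap]
  simp [List.foldl_map]

-- ===== VERDICT (by name: the statement is the Claim_ definition above) =====
theorem maxProductCount_spec : Claim_equal_maxProductCount := by
  unfold Claim_equal_maxProductCount
  intro arr n _ _
  unfold Spec_maxProductCount maxProductCount maxProductCount_alt
  have hstep : ∀ (d : PySem.Dict Int Int) (p : Int),
      (if d.contains p then d.insert p (d.getD p 0 + 1) else d.insert p 1)
        = d.insert p (d.getD p 0 + 1) := by
    intro d p
    by_cases h : d.contains p = true
    · rw [if_pos h]
    · rw [if_neg h, PySem.Dict.getD_of_not_contains d 0 (by simpa using h)]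
      norm_num
  simp only [hstep]
  have hm :
      List.foldl (fun mapp i =>
          List.foldl (fun mapp j =>
              mapp.insert (PySem.List.pyGetD arr i 0 * PySem.List.pyGetD arr j 0)
                (mapp.getD (PySem.List.pyGetD arr i 0 * PySem.List.pyGetD arr j 0) 0 + 1))
            mapp (PySem.List.pyRange (i + 1) n 1))
        (PySem.Dict.empty : PySem.Dict Int Int) (PySem.List.pyRange 0 n 1)
      = PySem.Dict.counter
          ((PySem.List.pyRange 0 n 1).flatMap (fun i =>
            (PySem.List.pyRange (i + 1) n 1).map (fun j =>
              PySem.List.pyGetD arr i 0 * PySem.List.pyGetD arr j 0))) := by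
    rw [← PySem.Dict.foldl_insert_getD_add_one_eq_counter]
    exact pvFoldlNested (PySem.List.pyRange 0 n 1) (fun i => PySem.List.pyRange (i + 1) n 1)
      (fun i j => PySem.List.pyGetD arr i 0 * PySem.List.pyGetD arr j 0)
      (fun (d : PySem.Dict Int Int) x => d.insert x (d.getD x 0 + 1)) PySem.Dict.empty
  rw [hm, PySem.Dict.keys_counter]
  simp only [PySem.Dict.getD_counter]
  exact pvMain _
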